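-- pv_equiv track=rewrite | github.com/FungiProxy/MyBabbittQuoteCopy | src/core/services/export_service.py | _get_chemical_compatibility
-- ===== SOURCE A (Python) =====
-- def _get_chemical_compatibility(items):
--     """Get chemical compatibility based on items."""
--     materials = set()
--     for item in items:
--         material = item.get("material")
--         if material:
--             materials.add(material)
--
--     if "H" in materials:
--         return "Superior resistance to acids, bases, and organic solvents"
--     elif "S" in materials:
--         return "Excellent corrosion resistance for most industrial applications"
--     else:
--         return "Standard chemical compatibility"
-- ===== SOURCE B (Python) =====
-- def _get_chemical_compatibility(items):
--     """Get chemical compatibility based on items."""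
--     if any(item.get("material") == "H" for item in items):
--         return "Superior resistance to acids, bases, and organic solvents"
--     if any(item.get("material") == "S" for item in items):
--         return "Excellent corrosion resistance for most industrial applications"
--     return "Standard chemical compatibility"
-- ===== Notes on version B (the rewrite author's own statement) =====
-- stated objective: simpler
-- what changed: B drops A's intermediate materials set entirely and instead short-circuit scans the item list directly for an item whose material is exactly "H", then "S".
import Mathlib
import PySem

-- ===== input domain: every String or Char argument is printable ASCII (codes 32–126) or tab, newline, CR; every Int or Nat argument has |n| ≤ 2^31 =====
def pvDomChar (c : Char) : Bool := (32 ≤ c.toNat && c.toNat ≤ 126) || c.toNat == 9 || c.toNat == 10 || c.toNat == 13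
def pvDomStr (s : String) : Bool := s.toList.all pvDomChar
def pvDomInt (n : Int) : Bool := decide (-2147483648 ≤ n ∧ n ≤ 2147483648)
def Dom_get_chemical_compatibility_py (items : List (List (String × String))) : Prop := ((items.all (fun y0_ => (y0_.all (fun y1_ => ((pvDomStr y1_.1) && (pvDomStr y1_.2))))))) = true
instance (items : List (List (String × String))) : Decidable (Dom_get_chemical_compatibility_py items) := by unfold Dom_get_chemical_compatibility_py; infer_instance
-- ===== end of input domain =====

-- B drops A's intermediate materials set and short-circuit scans the items directly; same result, simpler.

-- ===== PORT A =====
-- A: build a set of the truthy (nonempty) materials, then test "H" / "S" membership.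
def get_chemical_compatibility_py (items : List (List (String × String))) : String :=
  let materials := items.foldl (fun ms item =>
    match (PySem.Dict.mk item).get? "material" with
    | some m => if m ≠ "" then PySem.Set.add ms m else ms
    | none => ms) PySem.Set.empty
  if PySem.Set.contains materials "H" then
    "Superior resistance to acids, bases, and organic solvents"
  else if PySem.Set.contains materials "S" then
    "Excellent corrosion resistance for most industrial applications"
  else
    "Standard chemical compatibility"

-- ===== PORT B =====
-- B: no set; scan the items directly for an exact "H" material, then an exact "S" material.
def get_chemical_compatibility_py_alt (items : List (List (String × String))) : String :=
  if items.any (fun item => (PySem.Dict.mk item).get? "material" == some "H") then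
    "Superior resistance to acids, bases, and organic solvents"
  else if items.any (fun item => (PySem.Dict.mk item).get? "material" == some "S") then
    "Excellent corrosion resistance for most industrial applications"
  else
    "Standard chemical compatibility"

-- ===== PRECONDITION & SPEC =====
def Spec_get_chemical_compatibility_py (items : List (List (String × String))) (out : String) : Prop := out = get_chemical_compatibility_py_alt items
instance (items : List (List (String × String))) (out : String) : Decidable (Spec_get_chemical_compatibility_py items out) := by unfold Spec_get_chemical_compatibility_py; infer_instance

-- ===== CLAIM (what is proved, stated in full; the proofs are below) =====
def Claim_equal_get_chemical_compatibility_py : Prop := ∀ (items : List (List (String × String))), Dom_get_chemical_compatibility_py items → Spec_get_chemical_compatibility_py items (get_chemical_compatibility_py items)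

-- ===== LEMMAS AND PROOFS =====

-- Membership of a nonempty string m in A's accumulated set ↔ some item's material is exactly m.
theorem mem_materials_fold (items : List (List (String × String))) (acc : PySem.Set String)
    (m : String) (hm : m ≠ "") :
    m ∈ items.foldl (fun ms item =>
      match (PySem.Dict.mk item).get? "material" with
      | some v => if v ≠ "" then PySem.Set.add ms v else ms
      | none => ms) acc
    ↔ m ∈ acc ∨ items.any (fun item => (PySem.Dict.mk item).get? "material" == some m) := by
  induction items generalizing acc with
  | nil => simp
  | cons it rest ih =>
    simp only [List.foldl_cons, List.any_cons, Bool.or_eq_true]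
    rw [ih]
    cases h : (PySem.Dict.mk it).get? "material" with
    | none => simp
    | some v =>
      by_cases hv : v = ""
      · subst hv
        simp only [ne_eq, not_true_eq_false, if_false, beq_iff_eq, Option.some.injEq]
        constructor
        · rintro (ha | hb)
          · exact Or.inl ha
          · exact Or.inr (Or.inr hb)
        · rintro (ha | hb | hc)
          · exact Or.inl ha
          · exact (hm hb.symm).elim
          · exact Or.inr hc
      · simp only [ne_eq, hv, not_false_eq_true, if_true, PySem.Set.mem_add, beq_iff_eq,
          Option.some.injEq]
        constructor
        · rintro ((ha | he) | hb)
          · exact Or.inl ha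
          · exact Or.inr (Or.inl he.symm)
          · exact Or.inr (Or.inr hb)
        · rintro (ha | hb | hc)
          · exact Or.inl (Or.inl ha)
          · exact Or.inl (Or.inr hb.symm)
          · exact Or.inr hc

-- ===== VERDICT (by name: the statement is the Claim_ definition above) =====
theorem get_chemical_compatibility_py_spec : Claim_equal_get_chemical_compatibility_py := by
  intro items _
  unfold Spec_get_chemical_compatibility_py get_chemical_compatibility_py get_chemical_compatibility_py_alt
  have hH := mem_materials_fold items PySem.Set.empty "H" (by decide)
  have hS := mem_materials_fold items PySem.Set.empty "S" (by decide)
  simp only [PySem.Set.empty, List.not_mem_nil, false_or] at hH hS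
  by_cases cH : items.any (fun item => (PySem.Dict.mk item).get? "material" == some "H")
  · rw [if_pos cH, if_pos (by rw [PySem.Set.contains_iff]; exact hH.mpr cH)]
  · rw [if_neg cH, if_neg (by rw [PySem.Set.contains_iff]; exact fun h => cH (hH.mp h))]
    by_cases cS : items.any (fun item => (PySem.Dict.mk item).get? "material" == some "S")
    · rw [if_pos cS, if_pos (by rw [PySem.Set.contains_iff]; exact hS.mpr cS)]
    · rw [if_neg cS, if_neg (by rw [PySem.Set.contains_iff]; exact fun h => cS (hS.mp h))]
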